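-- pv_equiv track=rewrite | github.com/Th0rt/study-programing-skill | chapter8/question7.py | _make_patterns
-- ===== SOURCE A (Python) =====
-- from typing import List
--
-- def _make_patterns(x: List[str], y: str, res: list = None):
--     if res is None:
--         res = []
--
--     if len(x) == 0:
--         if len(res) == 0:
--             return _make_pattern("", y)
--         return res
--
--     res = res + _make_pattern(x[0], y)
--     return _make_patterns(x[1:], y, res)
--
-- def _make_pattern(x: str, y: str, res: list = None) -> List[str]:
--     if res is None:
--         res = []
--
--     if len(y) == 0:
--         return res
--
--     if y[0] not in x:
--         res.append(x+y[0])
--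
--     return _make_pattern(x, y[1:], res)
-- ===== SOURCE B (Python) =====
-- from typing import List
--
-- def _make_patterns(x: List[str], y: str, res: list = None):
--     out = (list(res) if res is not None else []) + [s + c for s in x for c in y if c not in s]
--     return out if out else [c for c in y]
-- ===== Notes on version B (the rewrite author's own statement) =====
-- stated objective: faster
-- what changed: Replaced the two mutually recursive accumulator functions (which rebuild res and x[1:] by copy at every step) with one flat comprehension (s+c for each s in x, c in y with c not in s) plus a fallback to list(y) when the result is empty.
import Mathlib
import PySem

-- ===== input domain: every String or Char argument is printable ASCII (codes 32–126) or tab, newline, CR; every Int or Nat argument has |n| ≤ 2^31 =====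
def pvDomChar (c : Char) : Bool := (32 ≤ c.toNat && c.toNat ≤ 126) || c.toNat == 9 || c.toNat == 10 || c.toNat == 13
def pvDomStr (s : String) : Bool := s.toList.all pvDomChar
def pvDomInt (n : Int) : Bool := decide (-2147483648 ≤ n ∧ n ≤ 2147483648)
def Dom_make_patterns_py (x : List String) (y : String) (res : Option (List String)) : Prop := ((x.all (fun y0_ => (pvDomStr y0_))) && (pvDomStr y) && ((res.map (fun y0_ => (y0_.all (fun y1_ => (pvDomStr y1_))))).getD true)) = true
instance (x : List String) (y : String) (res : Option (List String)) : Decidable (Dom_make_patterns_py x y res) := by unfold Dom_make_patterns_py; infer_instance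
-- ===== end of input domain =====

-- B replaces A's mutual recursion by a single flat comprehension plus an emptiness fallback (objective: simpler).
-- ===== PORT A =====
-- port of _make_pattern: recursion on y, accumulating res ('c in x' on single chars = char membership)
def makePatternA (x : String) (y : List Char) (res : List String) : List String :=
  match y with
  | [] => res
  | c :: ys =>
      let res := if x.toList.contains c then res else res ++ [String.mk (x.toList ++ [c])]
      makePatternA x ys res

def makePatternsA (x : List String) (y : List Char) (res : List String) : List String :=
  match x with
  | [] => if res.length = 0 then makePatternA "" y [] else res
  | s :: xs => makePatternsA xs y (res ++ makePatternA s y [])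

def make_patterns_py (x : List String) (y : String) (res : Option (List String)) : List String :=
  makePatternsA x y.toList (res.getD [])

-- ===== PORT B =====
def make_patterns_py_alt (x : List String) (y : String) (res : Option (List String)) : List String :=
  let out := (res.getD []) ++
    x.flatMap (fun s =>
      (y.toList.filter (fun c => !(s.toList.contains c))).map (fun c => String.mk (s.toList ++ [c])))
  if out.isEmpty then y.toList.map (fun c => String.mk [c]) else out

-- ===== PRECONDITION & SPEC =====
def Spec_make_patterns_py (x : List String) (y : String) (res : Option (List String)) (out : List String) : Prop := out = make_patterns_py_alt x y res
instance (x : List String) (y : String) (res : Option (List String)) (out : List String) : Decidable (Spec_make_patterns_py x y res out) := by unfold Spec_make_patterns_py; infer_instance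

-- ===== CLAIM (what is proved, stated in full; the proofs are below) =====
def Claim_equal_make_patterns_py : Prop := ∀ (x : List String) (y : String) (res : Option (List String)), Dom_make_patterns_py x y res → Spec_make_patterns_py x y res (make_patterns_py x y res)

-- ===== LEMMAS AND PROOFS =====

-- pat s y = the list _make_pattern(s, y, []) produces
def patB (s : String) (y : List Char) : List String :=
  (y.filter (fun c => !(s.toList.contains c))).map (fun c => String.mk (s.toList ++ [c]))

theorem makePatternA_eq (s : String) (y : List Char) (res : List String) :
    makePatternA s y res = res ++ patB s y := by
  induction y generalizing res with
  | nil => simp [makePatternA, patB]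
  | cons c ys ih =>
      by_cases h : c ∈ s.toList <;>
        simp [makePatternA, patB, h, ih, List.filter_cons, List.append_assoc]

theorem makePatternsA_eq (x : List String) (y : List Char) (res : List String) :
    makePatternsA x y res =
      if (res ++ x.flatMap (fun s => patB s y)) = [] then y.map (fun c => String.mk [c])
      else res ++ x.flatMap (fun s => patB s y) := by
  induction x generalizing res with
  | nil =>
      rcases res with _ | ⟨r, rs⟩ <;>
        simp [makePatternsA, makePatternA_eq, patB]
  | cons s xs ih =>
      simp [makePatternsA, makePatternA_eq, ih, List.append_assoc]

-- ===== VERDICT (by name: the statement is the Claim_ definition above) =====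
theorem make_patterns_py_spec : Claim_equal_make_patterns_py := by
  intro x y res _
  unfold Spec_make_patterns_py make_patterns_py make_patterns_py_alt
  rw [makePatternsA_eq]
  simp [patB, List.isEmpty_iff]
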